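-- pv_equiv track=rewrite | github.com/dante454/Casptone | Axeno de intentos pasados/funciones.py | separar_arribos
-- ===== SOURCE A (Python) =====
-- def separar_arribos(arribos, indicadores):
--     pickups = []
--     deliveries = []
--     for simulacion_index in range(len(arribos)):
--         pickups_simulacion = []
--         deliveries_simulacion = []
--         arr_simulacion = arribos[simulacion_index]
--         ind_simulacion = indicadores[simulacion_index]
--         for i in range(len(arr_simulacion)):
--             if ind_simulacion[i]:  # 1 es pick-up
--                 pickups_simulacion.append(arr_simulacion[i])
--             else:  # 0 es delivery
--                 deliveries_simulacion.append(arr_simulacion[i])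
--         pickups.append(pickups_simulacion)
--         deliveries.append(deliveries_simulacion)
--     return pickups, deliveries
-- ===== SOURCE B (Python) =====
-- def particionar(arr, ind):
--     # recursion on the structure of arr; results are built back-to-front
--     if not arr:
--         return [], []
--     p, d = particionar(arr[1:], ind[1:])
--     if ind[0]:
--         return [arr[0]] + p, d
--     return p, [arr[0]] + d
--
--
-- def separar_arribos(arribos, indicadores):
--     if not arribos:
--         return [], []
--     p0, d0 = particionar(arribos[0], indicadores[0])
--     ps, ds = separar_arribos(arribos[1:], indicadores[1:])
--     return [p0] + ps, [d0] + ds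
-- ===== Notes on version B (the rewrite author's own statement) =====
-- stated objective: alternative
-- what changed: Replaces A's index-driven loops with append-based accumulators by structural recursion on both list levels, consing each routed element onto the recursive result (built back-to-front, no indices or accumulators).
import Mathlib
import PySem

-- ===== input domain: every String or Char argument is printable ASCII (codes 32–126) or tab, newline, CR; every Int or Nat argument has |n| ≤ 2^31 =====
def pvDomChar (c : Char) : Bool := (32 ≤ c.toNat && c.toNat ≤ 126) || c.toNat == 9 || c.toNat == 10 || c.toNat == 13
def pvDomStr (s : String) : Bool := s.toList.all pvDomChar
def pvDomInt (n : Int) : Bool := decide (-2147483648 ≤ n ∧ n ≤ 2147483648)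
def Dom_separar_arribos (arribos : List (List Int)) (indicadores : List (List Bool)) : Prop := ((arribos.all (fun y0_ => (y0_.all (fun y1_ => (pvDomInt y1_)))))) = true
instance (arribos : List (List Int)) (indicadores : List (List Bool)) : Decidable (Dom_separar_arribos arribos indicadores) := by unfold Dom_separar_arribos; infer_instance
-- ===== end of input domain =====

-- B replaces A's index-driven loops and append accumulators by structural recursion on both
-- list levels, consing routed elements back-to-front (alternative, same cost); A's IndexError
-- cases are outside Pre_.


-- ===== PORT A =====
def separar_arribos (arribos : List (List Int)) (indicadores : List (List Bool)) : List (List Int) × List (List Int) :=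
  (PySem.List.pyRange 0 (PySem.List.len arribos)).foldl
    (fun acc simulacion_index =>
      let arr_simulacion := PySem.List.pyGetD arribos simulacion_index []
      let ind_simulacion := PySem.List.pyGetD indicadores simulacion_index []
      let inner := (PySem.List.pyRange 0 (PySem.List.len arr_simulacion)).foldl
        (fun acc2 i =>
          if PySem.List.pyGetD ind_simulacion i false then
            (acc2.1 ++ [PySem.List.pyGetD arr_simulacion i 0], acc2.2)
          else
            (acc2.1, acc2.2 ++ [PySem.List.pyGetD arr_simulacion i 0]))
        ([], [])
      (acc.1 ++ [inner.1], acc.2 ++ [inner.2]))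
    ([], [])

-- ===== PORT B =====
-- recursion on the structure of arr; results built back-to-front by consing.
-- ind[0] (an IndexError in Python when ind is empty) is read with default false; those
-- inputs are outside Pre_.
def particionar : List Int → List Bool → List Int × List Int
  | [], _ => ([], [])
  | a :: arr, ind =>
    let r := particionar arr (ind.drop 1)
    if PySem.List.pyGetD ind 0 false then (a :: r.1, r.2) else (r.1, a :: r.2)

def separar_arribos_alt (arribos : List (List Int)) (indicadores : List (List Bool)) : List (List Int) × List (List Int) :=
  match arribos with
  | [] => ([], [])
  | arr :: rest =>
    let pd := particionar arr (PySem.List.pyGetD indicadores 0 [])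
    let r := separar_arribos_alt rest (indicadores.drop 1)
    (pd.1 :: r.1, pd.2 :: r.2)

-- ===== PRECONDITION & SPEC =====
-- Pre_ excludes exactly the inputs where both A and B raise IndexError: indicadores shorter
-- than arribos, or some indicator list shorter than its arrival list.
def Pre_separar_arribos (arribos : List (List Int)) (indicadores : List (List Bool)) : Prop :=
  arribos.length ≤ indicadores.length ∧
  ∀ p ∈ arribos.zip indicadores, p.1.length ≤ p.2.length
instance (arribos : List (List Int)) (indicadores : List (List Bool)) : Decidable (Pre_separar_arribos arribos indicadores) := by unfold Pre_separar_arribos; infer_instance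
def pvWitness_separar_arribos : List (List Int) × List (List Bool) := ([[1, 2], [3]], [[true, false], [true]])

def Spec_separar_arribos (arribos : List (List Int)) (indicadores : List (List Bool)) (out : List (List Int) × List (List Int)) : Prop := out = separar_arribos_alt arribos indicadores
instance (arribos : List (List Int)) (indicadores : List (List Bool)) (out : List (List Int) × List (List Int)) : Decidable (Spec_separar_arribos arribos indicadores out) := by unfold Spec_separar_arribos; infer_instance

-- ===== CLAIM (what is proved, stated in full; the proofs are below) =====
def Claim_equal_separar_arribos : Prop := ∀ (arribos : List (List Int)) (indicadores : List (List Bool)), Dom_separar_arribos arribos indicadores → Pre_separar_arribos arribos indicadores → Spec_separar_arribos arribos indicadores (separar_arribos arribos indicadores)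

-- ===== LEMMAS AND PROOFS =====

-- A fold that routes each element to one of two accumulated lists.
theorem foldl_route {α : Type} (l : List Int) (f : Int → Bool) (g : Int → α) (p d : List α) :
    l.foldl (fun acc i => if f i then (acc.1 ++ [g i], acc.2) else (acc.1, acc.2 ++ [g i])) (p, d)
      = (p ++ (l.filter f).map g, d ++ (l.filter (fun i => !f i)).map g) := by
  induction l generalizing p d with
  | nil => simp
  | cons x xs ih =>
    by_cases h : f x <;> simp [h, ih]

-- A fold that appends one element to each of two accumulated lists at every step.
theorem foldl_pair {α : Type} (l : List Int) (F G : Int → α) (p d : List α) :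
    l.foldl (fun acc i => (acc.1 ++ [F i], acc.2 ++ [G i])) (p, d)
      = (p ++ l.map F, d ++ l.map G) := by
  induction l generalizing p d with
  | nil => simp
  | cons x xs ih => simp [ih]

-- zip written as an indexed map over range(len xs), provided xs is the shorter list.
theorem zip_eq_map_pyRange {α β : Type} (xs : List α) (ys : List β) (da : α) (db : β)
    (h : xs.length ≤ ys.length) :
    (PySem.List.pyRange 0 (PySem.List.len xs)).map
      (fun j => (PySem.List.pyGetD xs j da, PySem.List.pyGetD ys j db)) = xs.zip ys := by
  have hlen : PySem.List.len (xs.zip ys) = PySem.List.len xs := by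
    simp [PySem.List.len, Nat.min_eq_left h]
  have hz := PySem.List.map_pyGetD_pyRange_zero (xs.zip ys) (da, db)
  rw [hlen] at hz
  rw [← hz]
  apply List.map_congr_left
  intro j hj
  have hb := (PySem.List.mem_pyRange_one.mp hj)
  have h0 : 0 ≤ j := hb.1
  have h1 : j < (xs.length : Int) := by simpa [PySem.List.len] using hb.2
  have h1' : j < ((xs.zip ys).length : Int) := by
    simpa [List.length_zip, Nat.min_eq_left h] using h1
  have h2 : j < (ys.length : Int) := lt_of_lt_of_le h1 (by exact_mod_cast h)
  rw [PySem.List.pyGetD_eq_getElem _ _ h0 h1', PySem.List.pyGetD_eq_getElem _ _ h0 h1,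
      PySem.List.pyGetD_eq_getElem _ _ h0 h2]
  simp

-- Per-simulation: A's inner routing fold, characterised via zip/filter.
theorem inner_eq (arr : List Int) (ind : List Bool) (h : arr.length ≤ ind.length) :
    (PySem.List.pyRange 0 (PySem.List.len arr)).foldl
      (fun acc2 i =>
        if PySem.List.pyGetD ind i false then
          (acc2.1 ++ [PySem.List.pyGetD arr i 0], acc2.2)
        else
          (acc2.1, acc2.2 ++ [PySem.List.pyGetD arr i 0]))
      ([], [])
      = (((arr.zip ind).filter (fun q => q.2)).map (fun q => q.1),
         ((arr.zip ind).filter (fun q => !q.2)).map (fun q => q.1)) := by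
  rw [foldl_route]
  rw [← zip_eq_map_pyRange arr ind 0 false h]
  simp [List.filter_map, List.map_map, Function.comp_def]

-- B's recursive partition, characterised by the same zip/filter expression.
theorem particionar_eq (arr : List Int) (ind : List Bool) (h : arr.length ≤ ind.length) :
    particionar arr ind
      = (((arr.zip ind).filter (fun q => q.2)).map (fun q => q.1),
         ((arr.zip ind).filter (fun q => !q.2)).map (fun q => q.1)) := by
  induction arr generalizing ind with
  | nil => simp [particionar]
  | cons a arr ih =>
    cases ind with
    | nil => simp at h
    | cons b ind =>
      have h' : arr.length ≤ ind.length := by simpa using h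
      by_cases hb : b <;>
        simp [particionar, PySem.List.pyGetD, PySem.List.pyGet?, PySem.List.pyIdx?,
              hb, ih ind h']

-- Target characterisation of both ports, via zip/filter.
def pvChar (xs : List (List Int)) (ys : List (List Bool)) : List (List Int) × List (List Int) :=
  ((xs.zip ys).map (fun par => (((par.1.zip par.2).filter (fun q => q.2)).map (fun q => q.1))),
   (xs.zip ys).map (fun par => (((par.1.zip par.2).filter (fun q => !q.2)).map (fun q => q.1))))

theorem A_char (xs : List (List Int)) (ys : List (List Bool))
    (h1 : xs.length ≤ ys.length) (h2 : ∀ p ∈ xs.zip ys, p.1.length ≤ p.2.length) :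
    separar_arribos xs ys = pvChar xs ys := by
  unfold separar_arribos pvChar
  rw [foldl_pair]
  rw [← zip_eq_map_pyRange xs ys [] [] h1]
  simp only [List.map_map, List.nil_append, Prod.mk.injEq]
  constructor <;>
  · apply List.map_congr_left
    intro j hj
    have hb := PySem.List.mem_pyRange_one.mp hj
    have h0 : 0 ≤ j := hb.1
    have hlt : j < (xs.length : Int) := by simpa [PySem.List.len] using hb.2
    have hlt2 : j < (ys.length : Int) := lt_of_lt_of_le hlt (by exact_mod_cast h1)
    have hmem : (PySem.List.pyGetD xs j [], PySem.List.pyGetD ys j []) ∈ xs.zip ys := by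
      rw [PySem.List.pyGetD_eq_getElem _ _ h0 hlt, PySem.List.pyGetD_eq_getElem _ _ h0 hlt2]
      have hzl : j.toNat < (xs.zip ys).length := by
        simp only [List.length_zip]; omega
      have := List.getElem_mem hzl
      simpa [List.getElem_zip] using this
    have hle := h2 _ hmem
    simp only [Function.comp_def]
    rw [inner_eq _ _ hle]

theorem B_char (xs : List (List Int)) (ys : List (List Bool))
    (h1 : xs.length ≤ ys.length) (h2 : ∀ p ∈ xs.zip ys, p.1.length ≤ p.2.length) :
    separar_arribos_alt xs ys = pvChar xs ys := by
  induction xs generalizing ys with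
  | nil => simp [separar_arribos_alt, pvChar]
  | cons arr rest ih =>
    cases ys with
    | nil => simp at h1
    | cons ind inds =>
      have h1' : rest.length ≤ inds.length := by simpa using h1
      have h2' : ∀ p ∈ rest.zip inds, p.1.length ≤ p.2.length := by
        intro p hp; exact h2 p (by simp [hp])
      have hhead : arr.length ≤ ind.length := h2 (arr, ind) (by simp)
      simp only [separar_arribos_alt, pvChar, List.zip_cons_cons, List.map_cons,
        List.drop_succ_cons, List.drop_zero]
      rw [show PySem.List.pyGetD (ind :: inds) 0 [] = ind by
            simp [PySem.List.pyGetD, PySem.List.pyGet?, PySem.List.pyIdx?]]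
      rw [particionar_eq arr ind hhead, ih inds h1' h2']
      simp [pvChar]

theorem separar_arribos_eq (arribos : List (List Int)) (indicadores : List (List Bool))
    (hpre : Pre_separar_arribos arribos indicadores) :
    separar_arribos arribos indicadores = separar_arribos_alt arribos indicadores := by
  obtain ⟨h1, h2⟩ := hpre
  rw [A_char _ _ h1 h2, B_char _ _ h1 h2]

-- ===== VERDICT (by name: the statement is the Claim_ definition above) =====
theorem separar_arribos_spec : Claim_equal_separar_arribos := by
  intro arribos indicadores _ hpre
  unfold Spec_separar_arribos
  exact separar_arribos_eq arribos indicadores hpre
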